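-- pv_equiv track=rewrite | github.com/MASITH-developpement/Azalscore | registry/validators/finance/validate_rib/impl.py | _calculate_rib_key
-- ===== SOURCE A (Python) =====
-- def _letter_to_number(letter: str) -> int:
--     """
--     Convertit une lettre en nombre selon la table de correspondance RIB.
--
--     Table de conversion:
--     A,J = 1, B,K,S = 2, C,L,T = 3, D,M,U = 4, E,N,V = 5,
--     F,O,W = 6, G,P,X = 7, H,Q,Y = 8, I,R,Z = 9
--     """
--     letter = letter.upper()
--     conversion_table = {
--         'A': 1, 'J': 1,
--         'B': 2, 'K': 2, 'S': 2,
--         'C': 3, 'L': 3, 'T': 3,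
--         'D': 4, 'M': 4, 'U': 4,
--         'E': 5, 'N': 5, 'V': 5,
--         'F': 6, 'O': 6, 'W': 6,
--         'G': 7, 'P': 7, 'X': 7,
--         'H': 8, 'Q': 8, 'Y': 8,
--         'I': 9, 'R': 9, 'Z': 9,
--     }
--     return conversion_table.get(letter, 0)
--
-- def _convert_to_numeric(value: str) -> str:
--     """Convertit une chaîne alphanumériques en chiffres uniquement."""
--     result = ""
--     for char in value.upper():
--         if char.isdigit():
--             result += char
--         elif char.isalpha():
--             result += str(_letter_to_number(char))
--     return result
--
-- def _calculate_rib_key(bank_code: str, branch_code: str, account_number: str) -> int: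
--     """
--     Calcule la clé RIB selon l'algorithme officiel.
--
--     Formule: Clé = 97 - ((89 × B + 15 × G + 3 × C) mod 97)
--     où B = code banque, G = code guichet, C = compte
--
--     Les lettres sont converties en chiffres avant calcul.
--     """
--     # Convertir en numérique
--     b = _convert_to_numeric(bank_code)
--     g = _convert_to_numeric(branch_code)
--     c = _convert_to_numeric(account_number)
--
--     # Concaténer et convertir en entier
--     # Pour gérer les grands nombres, on utilise le calcul modulaire progressif
--     concatenated = b + g + c
--
--     # Calcul du reste par modulo 97
--     # Pour les grands nombres, on calcule progressivement
--     remainder = 0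
--     for digit in concatenated:
--         remainder = (remainder * 10 + int(digit)) % 97
--
--     # La formule complète est: 97 - ((89*B + 15*G + 3*C) mod 97)
--     # Simplifiée avec la concaténation: 97 - (concat mod 97) n'est pas exacte
--     # La vraie formule utilise les pondérations
--
--     # Utilisation de la méthode avec concaténation et décalage
--     # Clé = 97 - reste de (code_banque || code_guichet || numéro_compte || 00) / 97
--     concat_with_zeros = b + g + c + "00"
--
--     # Calcul progressif du modulo pour éviter les overflow
--     mod_result = 0
--     for digit in concat_with_zeros:
--         mod_result = (mod_result * 10 + int(digit)) % 97
--
--     key = 97 - mod_result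
--     return key
-- ===== SOURCE B (Python) =====
-- def _char_digits(value: str) -> str:
--     """Digits kept; letters mapped via the RIB table computed arithmetically
--     (A-I,J-R -> 1..9, S-Z -> 2..9); everything else dropped."""
--     pieces = []
--     for ch in value:
--         if ch.isdigit():
--             pieces.append(ch)
--         else:
--             u = ch.upper()
--             if 'A' <= u <= 'Z':
--                 i = ord(u) - ord('A')
--                 pieces.append(str(i % 9 + 1 if i < 18 else i - 16))
--     return "".join(pieces)
--
--
-- def _calculate_rib_key(bank_code: str, branch_code: str, account_number: str) -> int:
--     digits = (_char_digits(bank_code) + _char_digits(branch_code)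
--               + _char_digits(account_number) + "00")
--     return 97 - int(digits) % 97
-- ===== Notes on version B (the rewrite author's own statement) =====
-- stated objective: simpler
-- what changed: Replaces A's per-digit progressive Horner-modulo loop (and its dead first remainder loop) by one closed-form big-int computation 97 - int(digits) % 97, and replaces the 26-entry letter dictionary by the arithmetic formula i%9+1 / i-16 on the letter's alphabet index.
import Mathlib
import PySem

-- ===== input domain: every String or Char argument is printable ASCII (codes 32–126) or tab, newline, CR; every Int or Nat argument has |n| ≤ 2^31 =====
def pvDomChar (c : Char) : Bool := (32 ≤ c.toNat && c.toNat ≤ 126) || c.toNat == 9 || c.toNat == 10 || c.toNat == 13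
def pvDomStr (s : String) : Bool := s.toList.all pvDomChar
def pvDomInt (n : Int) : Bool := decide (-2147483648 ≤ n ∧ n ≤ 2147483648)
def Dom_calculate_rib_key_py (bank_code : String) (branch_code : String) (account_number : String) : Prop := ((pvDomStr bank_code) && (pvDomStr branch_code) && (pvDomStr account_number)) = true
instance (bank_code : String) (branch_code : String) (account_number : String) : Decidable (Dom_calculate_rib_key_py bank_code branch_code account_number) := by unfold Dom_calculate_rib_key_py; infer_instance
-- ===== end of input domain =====

-- B replaces A's per-digit progressive-modulo loop (plus a dead first loop) by one closed-form
-- modulo of the full concatenated number, and the 26-entry letter dictionary by an arithmetic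
-- formula on the alphabet index; objective: simpler.


-- ===== PORT A =====
-- _letter_to_number: every call site passes a single character, so it is ported over Char;
-- the dict lookup with default 0 becomes the same ordered case chain with default 0.
def pvLetterToNumber (letter : Char) : Int :=
  let l := PySem.Chars.upperChar letter
  if l = 'A' ∨ l = 'J' then 1
  else if l = 'B' ∨ l = 'K' ∨ l = 'S' then 2
  else if l = 'C' ∨ l = 'L' ∨ l = 'T' then 3
  else if l = 'D' ∨ l = 'M' ∨ l = 'U' then 4
  else if l = 'E' ∨ l = 'N' ∨ l = 'V' then 5
  else if l = 'F' ∨ l = 'O' ∨ l = 'W' then 6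
  else if l = 'G' ∨ l = 'P' ∨ l = 'X' then 7
  else if l = 'H' ∨ l = 'Q' ∨ l = 'Y' then 8
  else if l = 'I' ∨ l = 'R' ∨ l = 'Z' then 9
  else 0

-- _convert_to_numeric: the growing result string is a List Char accumulator.
def pvConvertToNumeric (value : String) : List Char :=
  (PySem.Chars.upper value.toList).foldl (fun result char =>
    if PySem.Chars.isdigit char then result ++ [char]
    else if PySem.Chars.isalpha char then result ++ (PySem.Int.toStr (pvLetterToNumber char)).toList
    else result) []

-- int(digit) on a one-digit string is ported as toNat - 48: exact, since both fold inputs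
-- are built by _convert_to_numeric / the "00" suffix and hence contain only ASCII digits.
def calculate_rib_key_py (bank_code : String) (branch_code : String) (account_number : String) : Int :=
  let b := pvConvertToNumeric bank_code
  let g := pvConvertToNumeric branch_code
  let c := pvConvertToNumeric account_number
  let concatenated := b ++ g ++ c
  let _remainder := concatenated.foldl (fun r d => (r * 10 + ((d.toNat : Int) - 48)) % 97) 0
  let concat_with_zeros := b ++ g ++ c ++ ['0', '0']
  let mod_result := concat_with_zeros.foldl (fun r d => (r * 10 + ((d.toNat : Int) - 48)) % 97) 0
  97 - mod_result

-- ===== PORT B =====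
-- _char_digits: digits kept, letters mapped by the arithmetic RIB formula; join of per-char
-- pieces is flatMap.
def pvCharDigits (value : String) : List Char :=
  value.toList.flatMap (fun ch =>
    if PySem.Chars.isdigit ch then [ch]
    else
      let u := PySem.Chars.upperChar ch
      if 'A' ≤ u ∧ u ≤ 'Z' then
        let i : Int := (u.toNat : Int) - 65
        (PySem.Int.toStr (if i < 18 then i % 9 + 1 else i - 16)).toList
      else [])

-- int(digits) is ported as the place-value number of the digit list: exact, since
-- _char_digits emits only ASCII digits and the "00" suffix makes the list nonempty.
def calculate_rib_key_py_alt (bank_code : String) (branch_code : String) (account_number : String) : Int :=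
  let digits := pvCharDigits bank_code ++ pvCharDigits branch_code ++ pvCharDigits account_number ++ ['0', '0']
  let n := digits.foldl (fun a d => 10 * a + ((d.toNat : Int) - 48)) 0
  97 - n % 97

-- ===== PRECONDITION & SPEC =====
def Spec_calculate_rib_key_py (bank_code : String) (branch_code : String) (account_number : String) (out : Int) : Prop := out = calculate_rib_key_py_alt bank_code branch_code account_number
instance (bank_code : String) (branch_code : String) (account_number : String) (out : Int) : Decidable (Spec_calculate_rib_key_py bank_code branch_code account_number out) := by unfold Spec_calculate_rib_key_py; infer_instance

-- ===== CLAIM (what is proved, stated in full; the proofs are below) =====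
def Claim_equal_calculate_rib_key_py : Prop := ∀ (bank_code : String) (branch_code : String) (account_number : String), Dom_calculate_rib_key_py bank_code branch_code account_number → Spec_calculate_rib_key_py bank_code branch_code account_number (calculate_rib_key_py bank_code branch_code account_number)

-- ===== LEMMAS AND PROOFS =====

-- the per-char emission of A (after the upper map) and of B
def pvPieceA (char : Char) : List Char :=
  if PySem.Chars.isdigit char then [char]
  else if PySem.Chars.isalpha char then (PySem.Int.toStr (pvLetterToNumber char)).toList
  else []

def pvPieceB (ch : Char) : List Char :=
  if PySem.Chars.isdigit ch then [ch]
  else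
    let u := PySem.Chars.upperChar ch
    if 'A' ≤ u ∧ u ≤ 'Z' then
      let i : Int := (u.toNat : Int) - 65
      (PySem.Int.toStr (if i < 18 then i % 9 + 1 else i - 16)).toList
    else []

-- the table lookup and the arithmetic formula agree on every ASCII char (checked exhaustively)
lemma pvPiece_eq_ofNat : ∀ n : Nat, n < 128 →
    pvPieceA (PySem.Chars.upperChar (Char.ofNat n)) = pvPieceB (Char.ofNat n) := by decide

lemma pvPiece_eq (c : Char) (h : pvDomChar c = true) :
    pvPieceA (PySem.Chars.upperChar c) = pvPieceB c := by
  have hlt : c.toNat < 128 := by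
    simp [pvDomChar] at h
    omega
  have := pvPiece_eq_ofNat c.toNat hlt
  rwa [Char.ofNat_toNat] at this

lemma pvConvert_eq (s : String) (h : pvDomStr s = true) :
    pvConvertToNumeric s = pvCharDigits s := by
  have hB : pvCharDigits s = s.toList.flatMap pvPieceB := rfl
  rw [hB]
  simp only [pvConvertToNumeric, PySem.Int.toList_toStr]
  have hf : ∀ (l : List Char) (acc : List Char),
      l.foldl (fun result char =>
        if PySem.Chars.isdigit char then result ++ [char]
        else if PySem.Chars.isalpha char then result ++ PySem.Int.toChars (pvLetterToNumber char)
        else result) acc = acc ++ l.flatMap pvPieceA := by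
    intro l
    induction l with
    | nil => intro acc; simp
    | cons c l ih =>
      intro acc
      simp only [List.foldl, List.flatMap_cons]
      rcases h1 : PySem.Chars.isdigit c with _ | _ <;>
        rcases h2 : PySem.Chars.isalpha c with _ | _ <;>
          simp [h1, h2, pvPieceA, ih]
  rw [hf]
  have hmap : PySem.Chars.upper s.toList = s.toList.map PySem.Chars.upperChar := by
    simp [PySem.Chars.upper]
  rw [hmap, List.flatMap_map, List.nil_append]
  apply List.flatMap_congr
  intro c hc
  apply pvPiece_eq
  simp [pvDomStr, List.all_eq_true] at h
  exact h c hc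

-- progressive modulo equals one modulo at the end
lemma pvHornerMod : ∀ (l : List Char) (a : Int),
    l.foldl (fun r d => (r * 10 + ((d.toNat : Int) - 48)) % 97) (a % 97)
      = (l.foldl (fun a d => 10 * a + ((d.toNat : Int) - 48)) a) % 97 := by
  intro l
  induction l with
  | nil => intro a; rfl
  | cons d l ih =>
    intro a
    simp only [List.foldl]
    have h : ((a % 97) * 10 + ((d.toNat : Int) - 48)) % 97
        = (10 * a + ((d.toNat : Int) - 48)) % 97 := by omega
    rw [h, ih]

-- ===== VERDICT (by name: the statement is the Claim_ definition above) =====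
theorem calculate_rib_key_py_spec : Claim_equal_calculate_rib_key_py := by
  intro bank_code branch_code account_number hdom
  unfold Dom_calculate_rib_key_py at hdom
  simp only [Bool.and_eq_true] at hdom
  obtain ⟨⟨hb, hg⟩, hc⟩ := hdom
  unfold Spec_calculate_rib_key_py calculate_rib_key_py calculate_rib_key_py_alt
  simp only [pvConvert_eq _ hb, pvConvert_eq _ hg, pvConvert_eq _ hc]
  have hm := pvHornerMod
    (pvCharDigits bank_code ++ pvCharDigits branch_code ++ pvCharDigits account_number ++ ['0', '0']) 0
  rw [Int.zero_emod] at hm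
  rw [hm]
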